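-- pv_equiv track=rewrite | github.com/ZeRafaelN/Montagem-bandas | projeto_2.py | combinacao
-- ===== SOURCE A (Python) =====
-- def combs(lista_combs:list,n:int) ->list:
--     '''
--         Recebe uma lista_combs 1D que contenha todos os possíveis músicos e o instrumento que toca,
--         recebe também uma variável n indicando a quantidade de integrantes da banda
--         retorna um vetor contendo as possíveis combinações
--     '''
--     if n == 0:
--         return [[]]
--     saida=[]
--     for j in range(len(lista_combs)):
--         for i in combs(lista_combs[j+1:],n-1):
--             saida.append([lista_combs[j],*i])
--     return saida
--
-- def combinacao(lista_combs:list,n:int) ->list: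
--     '''
--         Recebe uma lista_combs 1D que contenha todos os possíveis músicos e o instrumento que toca,
--         recebe também uma variável n indicando a quantidade de integrantes da banda
--         retorna um vetor contendo as possíveis combinações
--     '''
--     receba=combs(lista_combs,n)
--     lista_final=[]
--     for k in receba:
--         lista_repetidos=[]
--         lista_repetidos2=[]
--         repetido=False
--         for j in k:
--             if j[1] in lista_repetidos or j[0] in lista_repetidos2:
--                 #verifica se tem o nome repetido j[0] na nova combinação ou se tem o instrumento repetido j[1]
--                 repetido=True
--                 break
--             lista_repetidos.append(j[1])
--             lista_repetidos2.append(j[0])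
--         if repetido==False:
--             #se não tem repetido adiciona na lista final
--             lista_final.append(k)
--     return lista_final
-- ===== SOURCE B (Python) =====
-- def combinacao(lista_combs: list, n: int) -> list:
--     '''Backtracking: extend a partial band left-to-right, pruning any musician
--     whose name or instrument is already used, and pruning branches where fewer
--     musicians remain than are still needed; emits valid bands in DFS order.'''
--     if n <= 0:
--         return [[]] if n == 0 else []
--     out = []
--
--     def bt(start, chosen, names, instrs):
--         if len(chosen) == n:
--             out.append(chosen)
--             return
--         if n - len(chosen) > len(lista_combs) - start:
--             return
--         for j in range(start, len(lista_combs)):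
--             m = lista_combs[j]
--             if m[0] not in names and m[1] not in instrs:
--                 bt(j + 1, chosen + [m], names | {m[0]}, instrs | {m[1]})
--
--     bt(0, [], set(), set())
--     return out
-- ===== Notes on version B (the rewrite author's own statement) =====
-- stated objective: faster
-- what changed: A generates all C(m,n) index-combinations and then filters out those with a repeated name or instrument; B does a single DFS backtracking pass that prunes any branch reusing a name or instrument (and branches with too few musicians left), so invalid prefixes are never extended.
-- outside the precondition, e.g. on combinacao([['a', 'x'], ['a', 'y'], ['b']], 3): A returns [], B raises IndexError
import Mathlib
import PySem

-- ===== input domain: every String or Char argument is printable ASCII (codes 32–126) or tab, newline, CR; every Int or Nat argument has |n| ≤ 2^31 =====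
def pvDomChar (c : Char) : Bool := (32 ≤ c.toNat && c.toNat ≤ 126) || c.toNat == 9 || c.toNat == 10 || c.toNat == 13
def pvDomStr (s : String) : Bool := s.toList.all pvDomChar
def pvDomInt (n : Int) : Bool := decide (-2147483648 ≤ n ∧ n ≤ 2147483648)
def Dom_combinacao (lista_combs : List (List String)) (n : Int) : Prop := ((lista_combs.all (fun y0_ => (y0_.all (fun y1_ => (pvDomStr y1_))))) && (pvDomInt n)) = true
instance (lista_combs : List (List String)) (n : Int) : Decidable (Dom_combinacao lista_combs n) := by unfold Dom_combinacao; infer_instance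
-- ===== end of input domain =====

-- B replaces A's generate-then-filter with pruning DFS backtracking (measurably faster);
-- Pre_ excludes only inputs on which A or B raises IndexError on malformed (short) entries.

-- ===== PORT A =====
-- combs: the index loop 'for j in range(len)' with tails 'lista_combs[j+1:]' is the
-- suffix recursion below: j = 0 gives the head contribution, j ≥ 1 is the same loop on the tail.
def combs (lista_combs : List (List String)) (n : Int) : List (List (List String)) :=
  if n = 0 then [[]]
  else
    match lista_combs with
    | [] => []
    | x :: rest => ((combs rest (n - 1)).map (fun i => x :: i)) ++ combs rest n

-- A's inner filter loop: accumulators lista_repetidos (instruments) / lista_repetidos2 (names);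
-- j[1] / j[0] ported as getD (exact: Pre_ guarantees length ≥ 2 whenever accessed).
def temRepetido (k : List (List String)) (lista_repetidos lista_repetidos2 : List String) : Bool :=
  match k with
  | [] => false
  | j :: rest =>
    if lista_repetidos.contains (j.getD 1 "") || lista_repetidos2.contains (j.getD 0 "") then
      true
    else
      temRepetido rest (lista_repetidos ++ [j.getD 1 ""]) (lista_repetidos2 ++ [j.getD 0 ""])

def combinacao (lista_combs : List (List String)) (n : Int) : List (List (List String)) :=
  (combs lista_combs n).foldl
    (fun lista_final k => if temRepetido k [] [] then lista_final else lista_final ++ [k]) []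

-- ===== PORT B =====
-- B's bt(start, chosen, names, instrs): the 'for j in range(start, len)' loop is the
-- suffix recursion on the remaining list 'rest'; names/instrs are Python sets (PySem.Set);
-- the second guard is B's count prune ('fewer musicians remain than are still needed').
def btAlt (n : Int) (rest : List (List String)) (chosen : List (List String))
    (names instrs : PySem.Set String) : List (List (List String)) :=
  if (chosen.length : Int) = n then [chosen]
  else if (rest.length : Int) < n - (chosen.length : Int) then []
  else
    match rest with
    | [] => []
    | m :: tail =>
      (if !(PySem.Set.contains names (m.getD 0 "")) && !(PySem.Set.contains instrs (m.getD 1 "")) then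
        btAlt n tail (chosen ++ [m]) (PySem.Set.add names (m.getD 0 "")) (PySem.Set.add instrs (m.getD 1 ""))
      else []) ++ btAlt n tail chosen names instrs

def combinacao_alt (lista_combs : List (List String)) (n : Int) : List (List (List String)) :=
  if n ≤ 0 then (if n = 0 then [[]] else [])
  else btAlt n lista_combs [] PySem.Set.empty PySem.Set.empty

-- ===== PRECONDITION & SPEC =====
-- Pre_ excludes malformed inputs (an entry with fewer than 2 fields) with 1 ≤ n ≤ len(lista_combs):
-- on those A raises IndexError on j[0]/j[1] — or, when duplicate earlier entries make A's filter
-- break before reaching the short entry, A returns [] while B's own backtracking raises IndexError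
-- (see the cite); when n ≤ 0 or n > len(lista_combs) neither program indexes any entry.
def Pre_combinacao (lista_combs : List (List String)) (n : Int) : Prop :=
  n ≤ 0 ∨ (lista_combs.length : Int) < n ∨ ∀ m ∈ lista_combs, 2 ≤ m.length
instance (lista_combs : List (List String)) (n : Int) : Decidable (Pre_combinacao lista_combs n) := by
  unfold Pre_combinacao; infer_instance
def pvWitness_combinacao : List (List String) × Int :=
  ([["ana", "guitarra"], ["bia", "bateria"], ["ana", "baixo"]], 2)
def Spec_combinacao (lista_combs : List (List String)) (n : Int) (out : List (List (List String))) : Prop := out = combinacao_alt lista_combs n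
instance (lista_combs : List (List String)) (n : Int) (out : List (List (List String))) : Decidable (Spec_combinacao lista_combs n out) := by unfold Spec_combinacao; infer_instance

-- ===== CLAIM =====
def Claim_equal_combinacao : Prop := ∀ (lista_combs : List (List String)) (n : Int), Dom_combinacao lista_combs n → Pre_combinacao lista_combs n → Spec_combinacao lista_combs n (combinacao lista_combs n)

-- ===== LEMMAS AND PROOFS =====

-- A's filter-shaped foldl is a List.filter.
theorem foldl_filter_shape (p : List (List String) → Bool)
    (l : List (List (List String))) (acc : List (List (List String))) :
    l.foldl (fun a k => if p k then a else a ++ [k]) acc = acc ++ l.filter (fun k => !p k) := by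
  induction l generalizing acc with
  | nil => simp
  | cons x xs ih =>
    simp only [List.foldl_cons, List.filter_cons, ih]
    by_cases h : p x <;> simp [h]

theorem combs_zero (lista : List (List String)) : combs lista 0 = [[]] := by
  cases lista <;> rfl

theorem combs_neg (lista : List (List String)) : ∀ n : Int, n < 0 → combs lista n = [] := by
  induction lista with
  | nil => intro n h; rw [combs, if_neg (by omega)]
  | cons x rest ih =>
    intro n h
    rw [combs, if_neg (by omega)]
    simp [ih n h, ih (n - 1) (by omega)]

-- Too few elements left: no combination of size m exists.
theorem combs_short (lista : List (List String)) :
    ∀ m : Int, (lista.length : Int) < m → combs lista m = [] := by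
  induction lista with
  | nil =>
    intro m h
    rw [combs, if_neg (by simp at h; omega)]
  | cons x rest ih =>
    intro m h
    simp only [List.length_cons] at h
    rw [combs, if_neg (by omega)]
    rw [ih (m - 1) (by omega), ih m (by omega)]
    simp

-- Main invariant: backtracking from a partial band equals filtering the plain remaining
-- combinations against A's list accumulators (which on every DFS path coincide with B's sets).
theorem btAlt_eq_filter (n : Int) (lista : List (List String)) :
    ∀ (chosen : List (List String)) (names instrs : PySem.Set String),
    btAlt n lista chosen names instrs =
      ((combs lista (n - chosen.length)).filter
          (fun i => !temRepetido i instrs names)).map (fun i => chosen ++ i) := by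
  induction lista with
  | nil =>
    intro chosen names instrs
    by_cases h : (chosen.length : Int) = n
    · rw [btAlt, if_pos h, (by omega : n - (chosen.length : Int) = 0), combs_zero]
      simp [temRepetido]
    · rw [btAlt, if_neg h]
      by_cases hp : ((([] : List (List String)).length : Int) < n - (chosen.length : Int))
      · rw [if_pos hp, combs_short _ _ hp]
        simp
      · rw [if_neg hp, combs_neg _ _ (by simp at hp; omega)]
        simp
  | cons x rest ih =>
    intro chosen names instrs
    by_cases h : (chosen.length : Int) = n
    · rw [btAlt, if_pos h, (by omega : n - (chosen.length : Int) = 0), combs_zero]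
      simp [temRepetido]
    · by_cases hp : (((x :: rest).length : Int) < n - (chosen.length : Int))
      · rw [btAlt, if_neg h, if_pos hp, combs_short _ _ hp]
        simp
      · rw [btAlt, if_neg h, if_neg hp, combs,
            if_neg (by omega : ¬ n - (chosen.length : Int) = 0),
            List.filter_append, List.map_append]
        congr 1
        · -- head (j = start) contribution
          by_cases hv0 : (!(PySem.Set.contains names (x.getD 0 "")) && !(PySem.Set.contains instrs (x.getD 1 ""))) = true
          · have hv : names.contains (x.getD 0 "") = false ∧ instrs.contains (x.getD 1 "") = false := by
              simpa only [Bool.and_eq_true, Bool.not_eq_true'] using hv0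
            have h1 : x.getD 0 "" ∉ names := by simpa using hv.1
            have h2 : x.getD 1 "" ∉ instrs := by simpa using hv.2
            have hfil : List.filter ((fun i => !temRepetido i instrs names) ∘ fun i => x :: i)
                (combs rest (n - (chosen.length : Int) - 1))
                = List.filter (fun i => !temRepetido i (instrs ++ [x.getD 1 ""]) (names ++ [x.getD 0 ""]))
                    (combs rest (n - (chosen.length : Int) - 1)) := by
              apply List.filter_congr
              intro i _
              simp only [Function.comp_apply]
              rw [temRepetido]
              have hA : List.contains instrs (x.getD 1 "") = false := by simpa using h2
              have hB : List.contains names (x.getD 0 "") = false := by simpa using h1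
              rw [hA, hB]
              simp
            rw [if_pos hv0, ih, PySem.Set.add_of_not_mem h1, PySem.Set.add_of_not_mem h2,
                (by simp; omega : n - (((chosen ++ [x]).length : Int)) = n - (chosen.length : Int) - 1),
                List.filter_map, List.map_map, hfil]
            apply List.map_congr_left
            intro i _
            simp
          · rw [if_neg hv0, List.filter_map]
            have hnil : List.filter ((fun i => !temRepetido i instrs names) ∘ fun i => x :: i)
                (combs rest (n - (chosen.length : Int) - 1)) = [] := by
              apply List.filter_eq_nil_iff.mpr
              intro i _
              simp only [Function.comp_apply, Bool.not_eq_eq_eq_not, Bool.not_true, Bool.not_eq_false]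
              rw [temRepetido]
              cases hA : PySem.Set.contains names (x.getD 0 "") <;>
                cases hB : PySem.Set.contains instrs (x.getD 1 "") <;>
                simp_all
            rw [hnil]
            simp
        · exact ih chosen names instrs

-- ===== VERDICT =====
theorem combinacao_spec : Claim_equal_combinacao := by
  intro lista n _ _
  unfold Spec_combinacao combinacao combinacao_alt
  rw [foldl_filter_shape]
  by_cases h0 : n = 0
  · subst h0
    rw [combs_zero, if_pos (by omega : (0:Int) ≤ 0), if_pos rfl]
    simp [temRepetido]
  · by_cases hneg : n < 0
    · rw [combs_neg lista n hneg, if_pos (by omega : n ≤ 0), if_neg h0]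
      simp
    · rw [if_neg (by omega : ¬ n ≤ 0)]
      rw [btAlt_eq_filter n lista [] PySem.Set.empty PySem.Set.empty]
      simp [PySem.Set.empty]
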